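-- pv_equiv track=rewrite | github.com/rodrigopolastro/maratona-interfatecs | problemas-resolvidos/2ª Fase/Problemas_2015/ip.py | solve
-- ===== SOURCE A (Python) =====
-- def solve(ip1: str, ip2: str, mask: str) -> str:
--     for i in range(len(mask)):
--         bitmask = mask[i]
--         if bitmask != '1':
--             break
--         ip1_bit = ip1[i]
--         ip2_bit = ip2[i]
--         if ip1_bit != ip2_bit:
--             return 'N'
--     return 'S'
-- ===== SOURCE B (Python) =====
-- def solve(ip1: str, ip2: str, mask: str) -> str:
--     k = next((i for i, c in enumerate(mask) if c != '1'), len(mask))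
--     d = next((i for i, (a, b) in enumerate(zip(ip1, ip2)) if a != b),
--              min(len(ip1), len(ip2)))
--     return 'N' if d < k else 'S'
-- ===== Notes on version B (the rewrite author's own statement) =====
-- stated objective: alternative
-- what changed: B never compares the IPs under the mask in a loop at all: it computes two independent quantities -- k, the length of the mask's leading-'1' prefix, and d, the index of the first position where ip1 and ip2 differ (via zip, over the overlap) -- and decides by the arithmetic comparison d < k; A runs one interleaved loop over the mask with an early return.
import Mathlib
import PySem

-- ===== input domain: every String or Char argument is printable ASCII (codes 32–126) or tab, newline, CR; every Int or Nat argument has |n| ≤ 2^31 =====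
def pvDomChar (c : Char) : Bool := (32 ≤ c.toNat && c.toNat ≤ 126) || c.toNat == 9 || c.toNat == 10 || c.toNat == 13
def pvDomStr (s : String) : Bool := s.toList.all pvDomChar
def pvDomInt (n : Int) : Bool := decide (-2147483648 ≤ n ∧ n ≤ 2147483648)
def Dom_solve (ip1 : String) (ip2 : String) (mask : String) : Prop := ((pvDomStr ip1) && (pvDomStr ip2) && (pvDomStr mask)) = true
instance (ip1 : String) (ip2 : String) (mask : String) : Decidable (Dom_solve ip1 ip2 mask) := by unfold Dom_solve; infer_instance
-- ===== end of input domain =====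

-- B replaces A's interleaved compare-under-mask loop by two independent quantities
-- (k = leading-'1' prefix length of the mask, d = first index where the IPs differ)
-- and the arithmetic test d < k (objective: alternative).

-- ===== PORT A =====
-- A's loop over i in range(len(mask)): check mask[i], break if not '1', compare ip bits.
-- Out-of-range ip indexing (Python IndexError) is excluded by Pre_solve; the port reads
-- those positions with a default ' ' there (never reached inside Pre_).
def solveGo (l1 l2 lm : List Char) (i : Nat) : String :=
  if h : i < lm.length then
    let bitmask := lm[i]
    if bitmask ≠ '1' then "S"
    else
      let ip1_bit := (PySem.List.pyGet? l1 (i : Int)).getD ' '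
      let ip2_bit := (PySem.List.pyGet? l2 (i : Int)).getD ' '
      if ip1_bit ≠ ip2_bit then "N" else solveGo l1 l2 lm (i + 1)
  else "S"
termination_by lm.length - i

def solve (ip1 : String) (ip2 : String) (mask : String) : String :=
  solveGo ip1.toList ip2.toList mask.toList 0

-- ===== PORT B =====
-- k = next((i for i, c in enumerate(mask) if c != '1'), len(mask))
def leadingOnes : List Char → Nat
  | [] => 0
  | c :: cs => if c ≠ '1' then 0 else leadingOnes cs + 1

-- d = next((i for i, (a, b) in enumerate(zip(ip1, ip2)) if a != b), min(len(ip1), len(ip2)))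
-- (when zip is exhausted without a mismatch the recursion has consumed min(len,len) pairs)
def firstDiff : List Char → List Char → Nat
  | a :: as, b :: bs => if a ≠ b then 0 else firstDiff as bs + 1
  | _, _ => 0

def solve_alt (ip1 : String) (ip2 : String) (mask : String) : String :=
  let k := leadingOnes mask.toList
  let d := firstDiff ip1.toList ip2.toList
  if d < k then "N" else "S"

-- ===== PRECONDITION & SPEC =====
-- Pre_ excludes exactly the inputs where Python A raises IndexError: the leading-'1'
-- prefix of the mask is longer than one of the IP strings and no difference occurs
-- before the shorter string ends.
def Pre_solve (ip1 : String) (ip2 : String) (mask : String) : Prop :=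
  (mask.toList.takeWhile (· = '1')).length ≤ min ip1.toList.length ip2.toList.length ∨
  ip1.toList.take (min ip1.toList.length ip2.toList.length) ≠
    ip2.toList.take (min ip1.toList.length ip2.toList.length)
instance (ip1 : String) (ip2 : String) (mask : String) : Decidable (Pre_solve ip1 ip2 mask) := by
  unfold Pre_solve; infer_instance

def pvWitness_solve : String × String × String := ("1010", "1011", "1100")

def Spec_solve (ip1 : String) (ip2 : String) (mask : String) (out : String) : Prop := out = solve_alt ip1 ip2 mask
instance (ip1 : String) (ip2 : String) (mask : String) (out : String) : Decidable (Spec_solve ip1 ip2 mask out) := by unfold Spec_solve; infer_instance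

-- ===== CLAIM (what is proved, stated in full; the proofs are below) =====
def Claim_equal_solve : Prop := ∀ (ip1 : String) (ip2 : String) (mask : String), Dom_solve ip1 ip2 mask → Pre_solve ip1 ip2 mask → Spec_solve ip1 ip2 mask (solve ip1 ip2 mask)

-- ===== LEMMAS AND PROOFS =====

theorem leadingOnes_eq_takeWhile (lm : List Char) :
    leadingOnes lm = (lm.takeWhile (· = '1')).length := by
  induction lm with
  | nil => rfl
  | cons c cs ih =>
    by_cases hc : c = '1' <;> simp [leadingOnes, List.takeWhile, hc, ih]

theorem leadingOnes_get (lm : List Char) (i : Nat) (hi : i < leadingOnes lm) :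
    ∃ h : i < lm.length, lm[i] = '1' := by
  induction lm generalizing i with
  | nil => simp [leadingOnes] at hi
  | cons c cs ih =>
    simp only [leadingOnes] at hi
    by_cases hc : c = '1'
    · simp only [hc, ne_eq, not_true_eq_false, if_false] at hi
      cases i with
      | zero => exact ⟨by simp, by simp [hc]⟩
      | succ j =>
        obtain ⟨h, hg⟩ := ih j (by omega)
        exact ⟨by simpa using Nat.succ_lt_succ h, by simpa using hg⟩
    · simp [hc] at hi

theorem leadingOnes_stop (lm : List Char) (h : leadingOnes lm < lm.length) :
    lm[leadingOnes lm]'h ≠ '1' := by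
  induction lm with
  | nil => simp at h
  | cons c cs ih =>
    simp only [leadingOnes] at h ⊢
    by_cases hc : c = '1'
    · simp only [hc, ne_eq, not_true_eq_false, if_false] at h ⊢
      simpa using ih (by simpa using Nat.lt_of_succ_lt_succ h)
    · simp [hc]

theorem firstDiff_lt (l1 l2 : List Char) (i : Nat) (hi : i < firstDiff l1 l2) :
    ∃ (h1 : i < l1.length) (h2 : i < l2.length), l1[i] = l2[i] := by
  induction l1 generalizing l2 i with
  | nil => simp [firstDiff] at hi
  | cons a as ih =>
    cases l2 with
    | nil => simp [firstDiff] at hi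
    | cons b bs =>
      simp only [firstDiff] at hi
      by_cases hab : a = b
      · simp only [hab, ne_eq, not_true_eq_false, if_false] at hi
        cases i with
        | zero => exact ⟨by simp, by simp, by simp [hab]⟩
        | succ j =>
          obtain ⟨h1, h2, hg⟩ := ih bs j (by omega)
          exact ⟨by simpa using Nat.succ_lt_succ h1, by simpa using Nat.succ_lt_succ h2,
            by simpa using hg⟩
      · simp [hab] at hi

theorem firstDiff_ne (l1 l2 : List Char)
    (h1 : firstDiff l1 l2 < l1.length) (h2 : firstDiff l1 l2 < l2.length) :
    l1[firstDiff l1 l2]'h1 ≠ l2[firstDiff l1 l2]'h2 := by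
  induction l1 generalizing l2 with
  | nil => simp at h1
  | cons a as ih =>
    cases l2 with
    | nil => simp at h2
    | cons b bs =>
      simp only [firstDiff, List.length_cons] at h1 h2 ⊢
      by_cases hab : a = b
      · simp only [hab, ne_eq, not_true_eq_false, if_false] at h1 h2 ⊢
        simpa using ih bs (by omega) (by omega)
      · simp [hab]

theorem take_eq_of_min_le_firstDiff (l1 l2 : List Char)
    (h : min l1.length l2.length ≤ firstDiff l1 l2) :
    l1.take (min l1.length l2.length) = l2.take (min l1.length l2.length) := by
  induction l1 generalizing l2 with
  | nil => simp
  | cons a as ih =>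
    cases l2 with
    | nil => simp
    | cons b bs =>
      simp only [firstDiff, List.length_cons] at h ⊢
      by_cases hab : a = b
      · simp only [hab, ne_eq, not_true_eq_false, if_false] at h
        have hmin : min (as.length + 1) (bs.length + 1) = min as.length bs.length + 1 := by omega
        rw [hmin] at h ⊢
        simp only [List.take_succ_cons, hab]
        rw [ih bs (by omega)]
      · simp only [hab, ne_eq, not_false_eq_true, if_true] at h
        omega

-- The single interleaved loop of A, started at any i ≤ min(k, d), decides d < k.
theorem go_eq (l1 l2 lm : List Char) (i : Nat)
    (hpre : leadingOnes lm ≤ min l1.length l2.length ∨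
      l1.take (min l1.length l2.length) ≠ l2.take (min l1.length l2.length))
    (hik : i ≤ leadingOnes lm) (hid : i ≤ firstDiff l1 l2) :
    solveGo l1 l2 lm i = if firstDiff l1 l2 < leadingOnes lm then "N" else "S" := by
  by_cases h1 : i < leadingOnes lm
  · obtain ⟨hm, hg⟩ := leadingOnes_get lm i h1
    by_cases h2 : i < firstDiff l1 l2
    · obtain ⟨ha, hb, heq⟩ := firstDiff_lt l1 l2 i h2
      rw [solveGo, dif_pos hm]
      simp only [hg, ne_eq, not_true_eq_false, if_false,
        PySem.List.pyGet?_natCast, List.getElem?_eq_getElem ha, List.getElem?_eq_getElem hb,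
        Option.getD_some, heq, if_false]
      exact go_eq l1 l2 lm (i + 1) hpre h1 h2
    · -- i = firstDiff < leadingOnes; get an actual mismatch from Pre_
      have hieq : i = firstDiff l1 l2 := le_antisymm hid (not_lt.mp h2)
      have hdm : firstDiff l1 l2 < min l1.length l2.length := by
        rcases hpre with hp | hp
        · omega
        · by_contra hc
          exact hp (take_eq_of_min_le_firstDiff l1 l2 (not_lt.mp hc))
      have ha : i < l1.length := by omega
      have hb : i < l2.length := by omega
      have hne := firstDiff_ne l1 l2 (by omega) (by omega)
      rw [solveGo, dif_pos hm]
      simp only [hg, ne_eq, not_true_eq_false, if_false,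
        PySem.List.pyGet?_natCast, List.getElem?_eq_getElem ha, List.getElem?_eq_getElem hb,
        Option.getD_some]
      rw [if_pos (by subst hieq; exact hne), if_pos (by omega)]
  · -- i = leadingOnes: A stops (end of mask or mask bit ≠ '1'), and d < k is false
    have hieq : i = leadingOnes lm := le_antisymm hik (not_lt.mp h1)
    rw [if_neg (by omega)]
    by_cases hm : i < lm.length
    · have := leadingOnes_stop lm (hieq ▸ hm)
      rw [solveGo, dif_pos hm, if_pos (by simpa [hieq] using this)]
    · rw [solveGo, dif_neg hm]
termination_by leadingOnes lm - i

-- ===== VERDICT (by name: the statement is the Claim_ definition above) =====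
theorem solve_spec : Claim_equal_solve := by
  intro ip1 ip2 mask _ hpre
  unfold Spec_solve solve solve_alt
  rw [Pre_solve, ← leadingOnes_eq_takeWhile] at hpre
  exact go_eq _ _ _ 0 hpre (Nat.zero_le _) (Nat.zero_le _)
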